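-- pv_equiv track=rewrite | github.com/dalekreitler/cctbx-playground | mmtbx/ncs/ncs_search.py | get_preliminary_ncs_groups
-- ===== SOURCE A (Python) =====
-- def get_preliminary_ncs_groups(match_dict):
--   pairs = sorted(match_dict.keys())
--   chains_in_groups = []
--   preliminary_ncs_groups = []
--   while len(pairs) > 0:
--     # print "  pairs", pairs
--     # take the first one, should be new group
--     n_not_in_groups = 0
--     n_not_in_groups += pairs[0][0] not in chains_in_groups
--     n_not_in_groups += pairs[0][1] not in chains_in_groups
--     # print "n_not_in_groups", n_not_in_groups
--     if n_not_in_groups == 2: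
--       # make new group
--       preliminary_ncs_groups.append({
--           pairs[0][0]:pairs[0],
--           pairs[0][1]:pairs[0]})
--       chains_in_groups.append(pairs[0][0])
--       chains_in_groups.append(pairs[0][1])
--       curr_masters = pairs[0]
--       pairs.pop(0)
--       # print "  curr_masters", curr_masters
--       # check all the rest pairs to see if they can add something to this group
--       pairs_to_remove = []
--       for pair in pairs:
--         # print "    checking", pair
--         if pair[0] == curr_masters[0]:
--           if pair[1] not in curr_masters:
--             # add pair[1]
--             # print "      adding 0"
--             if pair[1] not in chains_in_groups:
--               preliminary_ncs_groups[-1][pair[1]] = pair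
--               chains_in_groups.append(pair[1])
--             pairs_to_remove.append(pair)
--
--         if pair[1] == curr_masters[0]:
--           if pair[0] not in curr_masters:
--             # print "      adding 1"
--             # add pair[1]
--             if pair[0] not in chains_in_groups:
--               preliminary_ncs_groups[-1][pair[0]] = pair
--               chains_in_groups.append(pair[0])
--             pairs_to_remove.append(pair)
--       for p in pairs_to_remove:
--         pairs.remove(p)
--
--     elif n_not_in_groups == 0:
--       # print "    popping the first"
--       pairs.pop(0)
--     elif n_not_in_groups == 1:
--       # should never happen
--       # print "    n_not_in_groups==1"
--       pairs.pop(0)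
--       # assert 0
--     # print "prel_ncs_gr", preliminary_ncs_groups
--   return preliminary_ncs_groups
-- ===== SOURCE B (Python) =====
-- def get_preliminary_ncs_groups(match_dict):
--   pairs = sorted(match_dict.keys())
--   grouped = set()
--   preliminary_ncs_groups = []
--   for i, pair in enumerate(pairs):
--     if pair[0] in grouped or pair[1] in grouped:
--       continue
--     group = {pair[0]: pair, pair[1]: pair}
--     grouped.add(pair[0])
--     grouped.add(pair[1])
--     master = pair[0]
--     for q in pairs[i + 1:]:
--       if q[0] == master or q[1] == master:
--         other = q[1] if q[0] == master else q[0]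
--         if other not in pair and other not in grouped:
--           group[other] = q
--           grouped.add(other)
--     preliminary_ncs_groups.append(group)
--   return preliminary_ncs_groups
-- ===== Notes on version B (the rewrite author's own statement) =====
-- stated objective: faster
-- what changed: A repeatedly mutates the sorted pair list (pop(0), a pairs_to_remove list replayed with list.remove rescans) and keeps grouped chains in a list with linear membership scans; B makes a single indexed pass over the immutable sorted pair list with a set of already-grouped chains, skipping pairs whose chains are grouped instead of physically removing them.
import Mathlib
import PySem

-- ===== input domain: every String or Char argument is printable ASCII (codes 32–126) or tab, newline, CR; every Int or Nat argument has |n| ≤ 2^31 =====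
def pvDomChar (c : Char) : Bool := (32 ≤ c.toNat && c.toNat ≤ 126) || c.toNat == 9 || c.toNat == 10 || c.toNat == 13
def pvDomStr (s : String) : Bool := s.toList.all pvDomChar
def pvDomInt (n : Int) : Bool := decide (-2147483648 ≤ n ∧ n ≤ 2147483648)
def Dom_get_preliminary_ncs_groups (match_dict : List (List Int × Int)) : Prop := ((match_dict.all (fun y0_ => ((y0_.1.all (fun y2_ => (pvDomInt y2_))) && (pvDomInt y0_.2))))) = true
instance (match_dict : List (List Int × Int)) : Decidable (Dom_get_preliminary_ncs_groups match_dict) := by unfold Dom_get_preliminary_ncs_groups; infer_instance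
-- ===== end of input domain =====

-- B replaces A's mutable pair list (pop(0), remove-rescans) and linear chain-list membership by a
-- single indexed pass over the sorted pairs with a set of already-grouped chains; same return value.

-- pair[0] / pair[1]; pyGetD is total, Pre_ guarantees the index is in range (length ≥ 2)
def pvK0 (q : List Int) : Int := PySem.List.pyGetD q 0 0
def pvK1 (q : List Int) : Int := PySem.List.pyGetD q 1 0

-- ===== PORT A =====
-- 'for p in pairs_to_remove: pairs.remove(p)'; remove? always succeeds here (every removed pair
-- was taken from pairs), so .getD totalizes without changing behaviour
def pvRemoveAll (l : List (List Int)) (ps : List (List Int)) : List (List Int) :=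
  ps.foldl (fun acc p => (PySem.List.remove? acc p).getD acc) l

-- cited by pvALoop's decreasing_by
lemma pvRemoveAll_sublist (ps l : List (List Int)) : (pvRemoveAll l ps).Sublist l := by
  induction ps generalizing l with
  | nil => simp [pvRemoveAll]
  | cons p ps ih =>
      have hstep : ((PySem.List.remove? l p).getD l).Sublist l := by
        by_cases hp : p ∈ l
        · rw [PySem.List.remove?_eq_some_erase l p hp]
          simpa using List.erase_sublist ..
        · rw [(PySem.List.remove?_eq_none_iff l p).2 hp]; simp
      exact ((ih _).trans hstep)

lemma pvRemoveAll_length_le (ps l : List (List Int)) : (pvRemoveAll l ps).length ≤ l.length :=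
  (pvRemoveAll_sublist ps l).length_le

-- one of the two symmetric 'if pair[t] == curr_masters[0]: …' blocks of the inner loop body:
-- t is the side compared with the master, o the chain that may be added;
-- state = (current group dict, chains_in_groups, pairs_to_remove)
def pvAHalf (a : Int) (cm : List Int)
    (st : PySem.Dict Int (List Int) × List Int × List (List Int)) (t o : Int) (q : List Int) :
    PySem.Dict Int (List Int) × List Int × List (List Int) :=
  if t = a then
    if o ∉ cm then
      if o ∉ st.2.1 then (st.1.insert o q, st.2.1 ++ [o], st.2.2 ++ [q])
      else (st.1, st.2.1, st.2.2 ++ [q])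
    else st
  else st

-- the inner 'for pair in pairs:' body: the two blocks in sequence
def pvAScan (a : Int) (cm : List Int)
    (st : PySem.Dict Int (List Int) × List Int × List (List Int)) (q : List Int) :
    PySem.Dict Int (List Int) × List Int × List (List Int) :=
  pvAHalf a cm (pvAHalf a cm st (pvK0 q) (pvK1 q) q) (pvK1 q) (pvK0 q) q

-- the 'while len(pairs) > 0:' loop; the group dict is appended then updated in place in A,
-- ported as building the dict during the scan and appending its items at the end of the iteration;
-- the n==0 and n==1 elif branches both pop the first pair and continue (n is always 0, 1 or 2)
def pvALoop (pairs : List (List Int)) (chains : List Int)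
    (groups : List (List (Int × List Int))) : List (List (Int × List Int)) :=
  match pairs with
  | [] => groups
  | pair :: rest =>
      let a := pvK0 pair
      let b := pvK1 pair
      let n : Nat := (if a ∈ chains then 0 else 1) + (if b ∈ chains then 0 else 1)
      if n = 2 then
        let g0 := (PySem.Dict.empty.insert a pair).insert b pair
        let st := rest.foldl (pvAScan a pair) (g0, chains ++ [a] ++ [b], [])
        pvALoop (pvRemoveAll rest st.2.2) st.2.1 (groups ++ [st.1.items])
      else
        pvALoop rest chains groups
termination_by pairs.length
decreasing_by
  · exact Nat.lt_succ_of_le (pvRemoveAll_length_le ..)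
  · simp

def get_preliminary_ncs_groups (match_dict : List (List Int × Int)) : List (List (Int × List Int)) :=
  pvALoop (PySem.List.sorted (PySem.List.dedup (match_dict.map Prod.fst)) (fun x => x) false) [] []

-- ===== PORT B =====
-- the inner 'for q in pairs[i + 1:]:' body; state = (current group dict, grouped set)
def pvBScan (m : Int) (pair : List Int)
    (st : PySem.Dict Int (List Int) × PySem.Set Int) (q : List Int) :
    PySem.Dict Int (List Int) × PySem.Set Int :=
  let q0 := pvK0 q
  let q1 := pvK1 q
  if q0 = m ∨ q1 = m then
    let other := if q0 = m then q1 else q0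
    if other ∉ pair ∧ ¬ PySem.Set.contains st.2 other then
      (st.1.insert other q, PySem.Set.add st.2 other)
    else st
  else st

-- the 'for i, pair in enumerate(pairs):' loop (rest = pairs[i + 1:])
def pvBLoop (pairs : List (List Int)) (grouped : PySem.Set Int)
    (groups : List (List (Int × List Int))) : List (List (Int × List Int)) :=
  match pairs with
  | [] => groups
  | pair :: rest =>
      let a := pvK0 pair
      let b := pvK1 pair
      if PySem.Set.contains grouped a || PySem.Set.contains grouped b then
        pvBLoop rest grouped groups
      else
        let g0 := (PySem.Dict.empty.insert a pair).insert b pair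
        let st := rest.foldl (pvBScan a pair) (g0, PySem.Set.add (PySem.Set.add grouped a) b)
        pvBLoop rest st.2 (groups ++ [st.1.items])

def get_preliminary_ncs_groups_alt (match_dict : List (List Int × Int)) : List (List (Int × List Int)) :=
  pvBLoop (PySem.List.sorted (PySem.List.dedup (match_dict.map Prod.fst)) (fun x => x) false)
    PySem.Set.empty []

-- ===== PRECONDITION & SPEC =====
-- Pre_ excludes exactly the inputs on which A raises IndexError: a dict key (chain-pair tuple)
-- of length < 2 is eventually subscripted at [0]/[1] by A (and by B).
def Pre_get_preliminary_ncs_groups (match_dict : List (List Int × Int)) : Prop :=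
  ∀ p ∈ match_dict, 2 ≤ p.1.length
instance (match_dict : List (List Int × Int)) : Decidable (Pre_get_preliminary_ncs_groups match_dict) := by
  unfold Pre_get_preliminary_ncs_groups; infer_instance

def pvWitness_get_preliminary_ncs_groups : (List (List Int × Int)) := [([1, 2], 0)]

def Spec_get_preliminary_ncs_groups (match_dict : List (List Int × Int)) (out : List (List (Int × List Int))) : Prop := out = get_preliminary_ncs_groups_alt match_dict
instance (match_dict : List (List Int × Int)) (out : List (List (Int × List Int))) : Decidable (Spec_get_preliminary_ncs_groups match_dict out) := by unfold Spec_get_preliminary_ncs_groups; infer_instance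

-- ===== CLAIM (what is proved, stated in full; the proofs are below) =====
def Claim_equal_get_preliminary_ncs_groups : Prop := ∀ (match_dict : List (List Int × Int)), Dom_get_preliminary_ncs_groups match_dict → Pre_get_preliminary_ncs_groups match_dict → Spec_get_preliminary_ncs_groups match_dict (get_preliminary_ncs_groups match_dict)

-- ===== LEMMAS AND PROOFS =====

lemma pvK0_mem (q : List Int) (h : 1 ≤ q.length) : pvK0 q ∈ q :=
  PySem.List.pyGetD_mem q 0 (by unfold PySem.Raise.InRange; omega)

lemma mem_pvRemoveAll (ps l : List (List Int)) (hnd : l.Nodup) (x : List Int) :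
    x ∈ pvRemoveAll l ps ↔ x ∈ l ∧ x ∉ ps := by
  induction ps generalizing l with
  | nil => simp [pvRemoveAll]
  | cons p ps ih =>
      have hstep : ∀ y, y ∈ ((PySem.List.remove? l p).getD l) ↔ y ∈ l ∧ y ≠ p := by
        intro y
        by_cases hp : p ∈ l
        · rw [PySem.List.remove?_eq_some_erase l p hp]
          simp [hnd.mem_erase_iff, and_comm]
        · rw [(PySem.List.remove?_eq_none_iff l p).2 hp]
          simp only [Option.getD_none]
          constructor
          · intro hy; exact ⟨hy, fun he => hp (he ▸ hy)⟩
          · exact fun h => h.1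
      have hnd' : ((PySem.List.remove? l p).getD l).Nodup := by
        by_cases hp : p ∈ l
        · rw [PySem.List.remove?_eq_some_erase l p hp]; exact hnd.erase p
        · rw [(PySem.List.remove?_eq_none_iff l p).2 hp]; exact hnd
      have hr : pvRemoveAll l (p :: ps) = pvRemoveAll ((PySem.List.remove? l p).getD l) ps := rfl
      rw [hr, ih _ hnd', hstep]
      simp only [List.mem_cons]
      tauto

-- invariant of A's inner scan: the master chain is among chains_in_groups and every pair queued
-- for removal has both its [0] and [1] chains among chains_in_groups
def pvInv (a : Int) (st : PySem.Dict Int (List Int) × List Int × List (List Int)) : Prop :=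
  a ∈ st.2.1 ∧ ∀ p ∈ st.2.2, pvK0 p ∈ st.2.1 ∧ pvK1 p ∈ st.2.1

lemma pvAHalf_grow (a : Int) (cm : List Int) (st : PySem.Dict Int (List Int) × List Int × List (List Int))
    (t o : Int) (q : List Int) : st.2.1 ⊆ (pvAHalf a cm st t o q).2.1 := by
  unfold pvAHalf; split_ifs <;> simp

lemma pvAScan_grow (a : Int) (cm : List Int) (st : PySem.Dict Int (List Int) × List Int × List (List Int))
    (q : List Int) : st.2.1 ⊆ (pvAScan a cm st q).2.1 :=
  (pvAHalf_grow ..).trans (pvAHalf_grow ..)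

lemma pvAFold_grow (a : Int) (cm : List Int) (l : List (List Int))
    (st : PySem.Dict Int (List Int) × List Int × List (List Int)) :
    st.2.1 ⊆ (l.foldl (pvAScan a cm) st).2.1 := by
  induction l generalizing st with
  | nil => exact fun _ h => h
  | cons q l ih => exact (pvAScan_grow a cm st q).trans (ih _)

lemma pvAHalf_inv (a : Int) (cm : List Int) (st : PySem.Dict Int (List Int) × List Int × List (List Int))
    (t o : Int) (q : List Int) (h : pvInv a st)
    (hcase : (t = pvK0 q ∧ o = pvK1 q) ∨ (t = pvK1 q ∧ o = pvK0 q)) :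
    pvInv a (pvAHalf a cm st t o q) := by
  by_cases ht : t = a
  · by_cases ho : o ∈ cm
    · simpa [pvAHalf, ht, ho] using h
    · by_cases hch : o ∈ st.2.1
      · have e : pvAHalf a cm st t o q = (st.1, st.2.1, st.2.2 ++ [q]) := by
          simp [pvAHalf, ht, ho, hch]
        rw [e]
        refine ⟨h.1, ?_⟩
        intro p hp
        rcases List.mem_append.1 hp with hp | hp
        · exact h.2 p hp
        · have hpq : p = q := by simpa using hp
          subst hpq
          rcases hcase with ⟨rfl, rfl⟩ | ⟨rfl, rfl⟩
          · exact ⟨by simp [ht, h.1], hch⟩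
          · exact ⟨hch, by simp [ht, h.1]⟩
      · have e : pvAHalf a cm st t o q = (st.1.insert o q, st.2.1 ++ [o], st.2.2 ++ [q]) := by
          simp [pvAHalf, ht, ho, hch]
        rw [e]
        refine ⟨by simp [h.1], ?_⟩
        intro p hp
        rcases List.mem_append.1 hp with hp | hp
        · exact ⟨by simp [(h.2 p hp).1], by simp [(h.2 p hp).2]⟩
        · have hpq : p = q := by simpa using hp
          subst hpq
          rcases hcase with ⟨rfl, rfl⟩ | ⟨rfl, rfl⟩
          · exact ⟨by simp [ht, h.1], by simp⟩
          · exact ⟨by simp, by simp [ht, h.1]⟩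
  · simpa [pvAHalf, ht] using h

lemma pvAScan_inv (a : Int) (cm : List Int) (st : PySem.Dict Int (List Int) × List Int × List (List Int))
    (q : List Int) (h : pvInv a st) : pvInv a (pvAScan a cm st q) :=
  pvAHalf_inv a cm _ _ _ q (pvAHalf_inv a cm st _ _ q h (Or.inl ⟨rfl, rfl⟩)) (Or.inr ⟨rfl, rfl⟩)

lemma pvAFold_inv (a : Int) (cm : List Int) (l : List (List Int))
    (st : PySem.Dict Int (List Int) × List Int × List (List Int)) (h : pvInv a st) :
    pvInv a (l.foldl (pvAScan a cm) st) := by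
  induction l generalizing st with
  | nil => exact h
  | cons q l ih => exact ih _ (pvAScan_inv a cm st q h)

-- one inner-scan step: A's state (dict, chains, to-remove) and B's state (dict, set) stay in lockstep
lemma pvStep_eq (a : Int) (pair : List Int) (ha : a ∈ pair)
    (g : PySem.Dict Int (List Int)) (ch : List Int) (rem : List (List Int)) (S : PySem.Set Int)
    (hmem : ∀ x : Int, x ∈ ch ↔ x ∈ S) (q : List Int) :
    (pvAScan a pair (g, ch, rem) q).1 = (pvBScan a pair (g, S) q).1 ∧
    (∀ x : Int, x ∈ (pvAScan a pair (g, ch, rem) q).2.1 ↔ x ∈ (pvBScan a pair (g, S) q).2) := by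
  by_cases hq0 : pvK0 q = a <;> by_cases hq1 : pvK1 q = a
  · -- both sides equal the master: nothing is added on either side
    rw [show pvAScan a pair (g, ch, rem) q = (g, ch, rem) by
          simp [pvAScan, pvAHalf, hq0, hq1, ha],
        show pvBScan a pair (g, S) q = (g, S) by simp [pvBScan, hq0, hq1, ha]]
    exact ⟨rfl, hmem⟩
  · -- q[0] is the master, q[1] the candidate chain
    by_cases hp : pvK1 q ∈ pair
    · rw [show pvAScan a pair (g, ch, rem) q = (g, ch, rem) by
            simp [pvAScan, pvAHalf, hq0, hq1, hp],
          show pvBScan a pair (g, S) q = (g, S) by simp [pvBScan, hq0, hq1, hp]]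
      exact ⟨rfl, hmem⟩
    · by_cases hc : pvK1 q ∈ ch
      · rw [show pvAScan a pair (g, ch, rem) q = (g, ch, rem ++ [q]) by
              simp [pvAScan, pvAHalf, hq0, hq1, hp, hc],
            show pvBScan a pair (g, S) q = (g, S) by
              simp [pvBScan, PySem.Set.contains, hq0, hq1, hp, (hmem _).1 hc]]
        exact ⟨rfl, hmem⟩
      · have hcS : pvK1 q ∉ S := fun hx => hc ((hmem _).2 hx)
        rw [show pvAScan a pair (g, ch, rem) q
              = (g.insert (pvK1 q) q, ch ++ [pvK1 q], rem ++ [q]) by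
              simp [pvAScan, pvAHalf, hq0, hq1, hp, hc],
            show pvBScan a pair (g, S) q = (g.insert (pvK1 q) q, S.add (pvK1 q)) by
              simp [pvBScan, PySem.Set.contains, hq0, hq1, hp, hcS]]
        refine ⟨rfl, fun x => ?_⟩
        simp [PySem.Set.mem_add, hmem x]
  · -- q[1] is the master, q[0] the candidate chain
    by_cases hp : pvK0 q ∈ pair
    · rw [show pvAScan a pair (g, ch, rem) q = (g, ch, rem) by
            simp [pvAScan, pvAHalf, hq0, hq1, hp],
          show pvBScan a pair (g, S) q = (g, S) by simp [pvBScan, hq0, hq1, hp]]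
      exact ⟨rfl, hmem⟩
    · by_cases hc : pvK0 q ∈ ch
      · rw [show pvAScan a pair (g, ch, rem) q = (g, ch, rem ++ [q]) by
              simp [pvAScan, pvAHalf, hq0, hq1, hp, hc],
            show pvBScan a pair (g, S) q = (g, S) by
              simp [pvBScan, PySem.Set.contains, hq0, hq1, hp, (hmem _).1 hc]]
        exact ⟨rfl, hmem⟩
      · have hcS : pvK0 q ∉ S := fun hx => hc ((hmem _).2 hx)
        rw [show pvAScan a pair (g, ch, rem) q
              = (g.insert (pvK0 q) q, ch ++ [pvK0 q], rem ++ [q]) by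
              simp [pvAScan, pvAHalf, hq0, hq1, hp, hc],
            show pvBScan a pair (g, S) q = (g.insert (pvK0 q) q, S.add (pvK0 q)) by
              simp [pvBScan, PySem.Set.contains, hq0, hq1, hp, hcS]]
        refine ⟨rfl, fun x => ?_⟩
        simp [PySem.Set.mem_add, hmem x]
  · -- neither side equals the master: both sides skip q
    rw [show pvAScan a pair (g, ch, rem) q = (g, ch, rem) by
          simp [pvAScan, pvAHalf, hq0, hq1],
        show pvBScan a pair (g, S) q = (g, S) by simp [pvBScan, hq0, hq1]]
    exact ⟨rfl, hmem⟩

-- A's inner scan over the surviving pairs equals B's inner scan over all later pairs: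
-- the extra pairs seen by B have both chains in chains0 ∌ a, so B skips them
lemma pvScan_eq (a : Int) (pair : List Int) (chains0 : List Int)
    (ha : a ∈ pair) (hna : a ∉ chains0) :
    ∀ (lB lA : List (List Int)) (g : PySem.Dict Int (List Int)) (ch : List Int)
      (rem : List (List Int)) (S : PySem.Set Int),
    lA.Sublist lB → lB.Nodup →
    (∀ x : Int, x ∈ ch ↔ x ∈ S) →
    (∀ q ∈ lB, q ∉ lA → pvK0 q ∈ chains0 ∧ pvK1 q ∈ chains0) →
    (lA.foldl (pvAScan a pair) (g, ch, rem)).1 = (lB.foldl (pvBScan a pair) (g, S)).1 ∧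
    (∀ x : Int, x ∈ (lA.foldl (pvAScan a pair) (g, ch, rem)).2.1 ↔
                x ∈ (lB.foldl (pvBScan a pair) (g, S)).2) := by
  intro lB
  induction lB with
  | nil =>
      intro lA g ch rem S hsub _ hmem _
      rw [List.sublist_nil.mp hsub]
      exact ⟨rfl, hmem⟩
  | cons q restB ih =>
      intro lA g ch rem S hsub hnd hmem hext
      cases hsub with
      | cons _ h =>
          have hqA : q ∉ lA := fun hq => (List.nodup_cons.mp hnd).1 (h.subset hq)
          have hin := hext q (List.mem_cons_self ..) hqA
          have hq0 : pvK0 q ≠ a := fun e => hna (e ▸ hin.1)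
          have hq1 : pvK1 q ≠ a := fun e => hna (e ▸ hin.2)
          rw [List.foldl_cons,
              show pvBScan a pair (g, S) q = (g, S) by simp [pvBScan, hq0, hq1]]
          exact ih lA g ch rem S h (List.nodup_cons.mp hnd).2 hmem
            (fun q' hq' hq'A => hext q' (List.mem_cons_of_mem _ hq') hq'A)
      | cons₂ _ h =>
          rename_i restA
          have step := pvStep_eq a pair ha g ch rem S hmem q
          rw [List.foldl_cons, List.foldl_cons,
              show pvBScan a pair (g, S) q
                = ((pvAScan a pair (g, ch, rem) q).1, (pvBScan a pair (g, S) q).2) by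
                rw [step.1]]
          have hext' : ∀ q' ∈ restB, q' ∉ restA →
              pvK0 q' ∈ chains0 ∧ pvK1 q' ∈ chains0 := by
            intro q' hq' hq'A
            refine hext q' (List.mem_cons_of_mem _ hq') ?_
            intro hmemA
            rcases List.mem_cons.mp hmemA with rfl | hc
            · exact (List.nodup_cons.mp hnd).1 hq'
            · exact hq'A hc
          exact ih restA (pvAScan a pair (g, ch, rem) q).1
            (pvAScan a pair (g, ch, rem) q).2.1 (pvAScan a pair (g, ch, rem) q).2.2
            (pvBScan a pair (g, S) q).2 h (List.nodup_cons.mp hnd).2 step.2 hext'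

-- unfolding equations for the two loops
lemma pvALoop_cons_skip (q : List Int) (rest : List (List Int)) (chains : List Int)
    (gs : List (List (Int × List Int))) (hn : pvK0 q ∈ chains ∨ pvK1 q ∈ chains) :
    pvALoop (q :: rest) chains gs = pvALoop rest chains gs := by
  rw [pvALoop.eq_def]
  simp only
  have h2 : ((if pvK0 q ∈ chains then 0 else 1) + if pvK1 q ∈ chains then 0 else 1 : Nat) ≠ 2 := by
    split_ifs with h1 h2 <;> simp_all
  simp [h2]

lemma pvALoop_cons_group (q : List Int) (rest : List (List Int)) (chains : List Int)
    (gs : List (List (Int × List Int))) (h0 : pvK0 q ∉ chains) (h1 : pvK1 q ∉ chains) :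
    pvALoop (q :: rest) chains gs =
      pvALoop
        (pvRemoveAll rest
          (rest.foldl (pvAScan (pvK0 q) q)
            ((PySem.Dict.empty.insert (pvK0 q) q).insert (pvK1 q) q,
              chains ++ [pvK0 q] ++ [pvK1 q], [])).2.2)
        (rest.foldl (pvAScan (pvK0 q) q)
          ((PySem.Dict.empty.insert (pvK0 q) q).insert (pvK1 q) q,
            chains ++ [pvK0 q] ++ [pvK1 q], [])).2.1
        (gs ++
          [(rest.foldl (pvAScan (pvK0 q) q)
              ((PySem.Dict.empty.insert (pvK0 q) q).insert (pvK1 q) q,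
                chains ++ [pvK0 q] ++ [pvK1 q], [])).1.items]) := by
  rw [pvALoop.eq_def]
  simp [h0, h1]

lemma pvBLoop_cons_skip (q : List Int) (rest : List (List Int)) (S : PySem.Set Int)
    (gs : List (List (Int × List Int)))
    (hn : pvK0 q ∈ S ∨ pvK1 q ∈ S) :
    pvBLoop (q :: rest) S gs = pvBLoop rest S gs := by
  rw [pvBLoop.eq_def]
  simp only
  have hg : (PySem.Set.contains S (pvK0 q) || PySem.Set.contains S (pvK1 q)) = true := by
    rcases hn with h | h <;> simp [PySem.Set.contains, h]
  rw [hg]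
  simp

lemma pvBLoop_cons_group (q : List Int) (rest : List (List Int)) (S : PySem.Set Int)
    (gs : List (List (Int × List Int)))
    (h0 : pvK0 q ∉ S) (h1 : pvK1 q ∉ S) :
    pvBLoop (q :: rest) S gs =
      pvBLoop rest
        (rest.foldl (pvBScan (pvK0 q) q)
          ((PySem.Dict.empty.insert (pvK0 q) q).insert (pvK1 q) q,
            PySem.Set.add (PySem.Set.add S (pvK0 q)) (pvK1 q))).2
        (gs ++
          [(rest.foldl (pvBScan (pvK0 q) q)
              ((PySem.Dict.empty.insert (pvK0 q) q).insert (pvK1 q) q,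
                PySem.Set.add (PySem.Set.add S (pvK0 q)) (pvK1 q))).1.items]) := by
  rw [pvBLoop.eq_def]
  have hg : (PySem.Set.contains S (pvK0 q) || PySem.Set.contains S (pvK1 q)) = false := by
    simp [PySem.Set.contains, h0, h1]
  simp only [hg]
  simp

-- main simulation: A's loop on the surviving sublist equals B's loop on the full list,
-- provided every pair dropped by A has both chains already grouped
lemma pvLoop_eq : ∀ (pB pA : List (List Int)) (chains : List Int) (S : PySem.Set Int)
    (gs : List (List (Int × List Int))),
    pA.Sublist pB → pB.Nodup →
    (∀ q ∈ pB, 2 ≤ q.length) →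
    (∀ x : Int, x ∈ chains ↔ x ∈ S) →
    (∀ q ∈ pB, q ∉ pA → pvK0 q ∈ chains ∧ pvK1 q ∈ chains) →
    pvALoop pA chains gs = pvBLoop pB S gs := by
  intro pB
  induction pB with
  | nil =>
      intro pA chains S gs hsub _ _ _ _
      rw [List.sublist_nil.mp hsub, pvALoop, pvBLoop]
  | cons q restB ih =>
      intro pA chains S gs hsub hnd hlen hmem hext
      cases hsub with
      | cons _ h =>
          have hqA : q ∉ pA := fun hq => (List.nodup_cons.mp hnd).1 (h.subset hq)
          have hin := hext q (List.mem_cons_self ..) hqA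
          rw [pvBLoop_cons_skip q restB S gs (Or.inl ((hmem _).mp hin.1))]
          exact ih pA chains S gs h (List.nodup_cons.mp hnd).2
            (fun q' hq' => hlen q' (List.mem_cons_of_mem _ hq')) hmem
            (fun q' hq' hq'A => hext q' (List.mem_cons_of_mem _ hq') hq'A)
      | cons₂ _ h =>
          rename_i restA
          have hndB := (List.nodup_cons.mp hnd).2
          have hqB : q ∉ restB := (List.nodup_cons.mp hnd).1
          have hlen' : ∀ q' ∈ restB, 2 ≤ q'.length :=
            fun q' hq' => hlen q' (List.mem_cons_of_mem _ hq')
          have hext' : ∀ q' ∈ restB, q' ∉ restA →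
              pvK0 q' ∈ chains ∧ pvK1 q' ∈ chains := by
            intro q' hq' hq'A
            refine hext q' (List.mem_cons_of_mem _ hq') ?_
            intro hmemA
            rcases List.mem_cons.mp hmemA with rfl | hc
            · exact hqB hq'
            · exact hq'A hc
          by_cases hab : pvK0 q ∈ chains ∨ pvK1 q ∈ chains
          · rw [pvALoop_cons_skip q restA chains gs hab,
                pvBLoop_cons_skip q restB S gs (by rcases hab with h' | h'
                                                   · exact Or.inl ((hmem _).mp h')
                                                   · exact Or.inr ((hmem _).mp h'))]
            exact ih restA chains S gs h hndB hlen' hmem hext'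
          · rw [not_or] at hab
            have ha : pvK0 q ∈ q := pvK0_mem q (by have := hlen q (List.mem_cons_self ..); omega)
            set a := pvK0 q with ha_def
            set b := pvK1 q with hb_def
            set g0 := (PySem.Dict.empty.insert a q).insert b q with hg0
            set ch0 := chains ++ [a] ++ [b] with hch0
            set S0 := PySem.Set.add (PySem.Set.add S a) b with hS0
            have hmem0 : ∀ x : Int, x ∈ ch0 ↔ x ∈ S0 := by
              intro x
              simp only [hch0, hS0, List.mem_append, List.mem_singleton, PySem.Set.mem_add,
                hmem x]
            have scan := pvScan_eq a q chains ha hab.1 restB restA g0 ch0 [] S0 h hndB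
              hmem0 hext'
            have inv : pvInv a (restA.foldl (pvAScan a q) (g0, ch0, [])) :=
              pvAFold_inv a q restA (g0, ch0, []) ⟨by simp [hch0], by simp⟩
            have grow : ch0 ⊆ (restA.foldl (pvAScan a q) (g0, ch0, [])).2.1 :=
              pvAFold_grow a q restA (g0, ch0, [])
            have hndA : restA.Nodup := h.nodup hndB
            rw [pvALoop_cons_group q restA chains gs hab.1 hab.2,
                pvBLoop_cons_group q restB S gs
                  (fun hx => hab.1 ((hmem _).mpr hx)) (fun hx => hab.2 ((hmem _).mpr hx))]
            rw [show (restB.foldl (pvBScan a q) (g0, S0)).1.items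
                  = (restA.foldl (pvAScan a q) (g0, ch0, [])).1.items by rw [scan.1]]
            refine ih (pvRemoveAll restA (restA.foldl (pvAScan a q) (g0, ch0, [])).2.2)
              (restA.foldl (pvAScan a q) (g0, ch0, [])).2.1
              (restB.foldl (pvBScan a q) (g0, S0)).2
              (gs ++ [(restA.foldl (pvAScan a q) (g0, ch0, [])).1.items])
              ((pvRemoveAll_sublist ..).trans h) hndB hlen' scan.2 ?_
            intro q' hq' hq'A
            by_cases hqrA : q' ∈ restA
            · have hrem : q' ∈ (restA.foldl (pvAScan a q) (g0, ch0, [])).2.2 := by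
                by_contra hnr
                exact hq'A ((mem_pvRemoveAll _ _ hndA q').mpr ⟨hqrA, hnr⟩)
              exact inv.2 q' hrem
            · have hk := hext' q' hq' hqrA
              constructor
              · exact grow (by simp [hch0, hk.1])
              · exact grow (by simp [hch0, hk.2])

-- ===== VERDICT (by name: the statement is the Claim_ definition above) =====
theorem get_preliminary_ncs_groups_spec : Claim_equal_get_preliminary_ncs_groups := by
  intro md _ hpre
  unfold Spec_get_preliminary_ncs_groups get_preliminary_ncs_groups get_preliminary_ncs_groups_alt
  refine pvLoop_eq _ _ [] PySem.Set.empty [] (List.Sublist.refl _) ?_ ?_ ?_ ?_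
  · exact ((PySem.List.sorted_perm _ _ _).nodup_iff).mpr
      (PySem.List.nodup_dedup (md.map Prod.fst))
  · intro q hq
    rw [PySem.List.mem_sorted, PySem.List.mem_dedup] at hq
    rcases List.mem_map.mp hq with ⟨p, hp, rfl⟩
    exact hpre p hp
  · intro x
    simp [PySem.Set.empty]
  · intro q hq hnq
    exact absurd hq hnq
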